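-- pv_equiv track=rewrite | github.com/IuLax790/Kattis | drinkmenu.py | serve_drinks
-- ===== SOURCE A (Python) =====
-- def serve_drinks(drinks, orders):
--     """
--     Serves drinks to customers in the order they appear on the menu.
--
--     Args:
--       drinks: A list of drink names.
--       orders: A list of customer names.
--
--     Returns:
--       A list of drinks served to the customers in the correct order.
--     """
--
--     customer_drinks = {}
--     for customer in orders:
--         if customer not in customer_drinks:
--             customer_drinks[customer] = 0  # Initialize drink index to 0
--
--     served_drinks = []
--     for customer in orders:
--         served_drinks.append(drinks[customer_drinks[customer]])
--         customer_drinks[customer] += 1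
--
--     return served_drinks
-- ===== SOURCE B (Python) =====
-- def serve_drinks(drinks, orders):
--     out = [None] * len(orders)
--     for c in dict.fromkeys(orders):
--         k = 0
--         for i, customer in enumerate(orders):
--             if customer == c:
--                 out[i] = drinks[k]
--                 k += 1
--     return out
-- ===== Notes on version B (the rewrite author's own statement) =====
-- stated objective: alternative
-- what changed: Instead of one sequential pass with a mutable per-customer counter dict, B preallocates the output and scatters into it group by group: for each distinct customer it scans the orders and writes drinks[0], drinks[1], ... at that customer's positions.
import Mathlib
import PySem

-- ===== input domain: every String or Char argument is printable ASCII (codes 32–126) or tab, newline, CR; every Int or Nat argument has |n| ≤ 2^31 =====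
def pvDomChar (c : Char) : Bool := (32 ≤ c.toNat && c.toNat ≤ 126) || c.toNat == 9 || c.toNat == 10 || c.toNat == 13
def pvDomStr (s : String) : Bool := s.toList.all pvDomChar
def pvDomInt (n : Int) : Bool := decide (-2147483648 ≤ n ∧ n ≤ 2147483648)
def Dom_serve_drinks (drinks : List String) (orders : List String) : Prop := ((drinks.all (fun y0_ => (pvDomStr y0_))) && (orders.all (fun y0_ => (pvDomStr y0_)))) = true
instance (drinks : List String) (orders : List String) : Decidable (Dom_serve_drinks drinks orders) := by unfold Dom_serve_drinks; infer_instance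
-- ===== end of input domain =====

-- B replaces A's single counter-dict pass by a group-scatter: it preallocates the output
-- and, for each distinct customer, scans the orders writing drinks[0], drinks[1], ... at
-- that customer's positions (objective: alternative).


-- ===== PORT A =====
-- first loop: initialize each customer's counter to 0 (insert only if absent)
-- second loop: append drinks[counter], then increment; 'customer_drinks[customer]' is a
-- guaranteed-present key, ported as Dict.getD with default 0; drink indexing as pyGetD
-- (in range under Pre_).
def serve_drinks (drinks : List String) (orders : List String) : List String :=
  let customer_drinks : PySem.Dict String Int :=
    orders.foldl (fun d customer => if d.contains customer then d else d.insert customer 0)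
      PySem.Dict.empty
  let result := orders.foldl
    (fun (st : PySem.Dict String Int × List String) customer =>
      let idx := st.1.getD customer 0
      (st.1.insert customer (idx + 1), st.2 ++ [PySem.List.pyGetD drinks idx ""]))
    (customer_drinks, [])
  result.2

-- ===== PORT B =====
-- out = [None]*len(orders): None modeled as "" (under Pre_ every slot is overwritten);
-- dict.fromkeys(orders) iteration = PySem.List.dedup; out[i] = drinks[k] is List.set at
-- i.toNat (exact: enumerate indices are 0 ≤ i < len(out)); drinks[k] as pyGetD (in range
-- under Pre_).
def serve_drinks_alt (drinks : List String) (orders : List String) : List String :=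
  let out0 : List String := orders.map (fun _ => "")
  (PySem.List.dedup orders).foldl
    (fun out c =>
      ((PySem.List.enumerate orders).foldl
        (fun (st : List String × Int) p =>
          if p.2 = c then (st.1.set p.1.toNat (PySem.List.pyGetD drinks st.2 ""), st.2 + 1)
          else st)
        (out, 0)).1)
    out0

-- ===== PRECONDITION & SPEC =====
-- Pre_ excludes exactly the inputs where Python A raises IndexError: some order's
-- occurrence count among the earlier orders reaches the number of drinks.
def Pre_serve_drinks (drinks : List String) (orders : List String) : Prop :=
  ∀ i < orders.length, (orders.take i).count (orders.getD i "") < drinks.length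
instance (drinks : List String) (orders : List String) : Decidable (Pre_serve_drinks drinks orders) := by unfold Pre_serve_drinks; infer_instance
def pvWitness_serve_drinks : List String × List String := (["tea", "ale"], ["bob", "ann", "bob"])
def Spec_serve_drinks (drinks : List String) (orders : List String) (out : List String) : Prop := out = serve_drinks_alt drinks orders
instance (drinks : List String) (orders : List String) (out : List String) : Decidable (Spec_serve_drinks drinks orders out) := by unfold Spec_serve_drinks; infer_instance

-- ===== CLAIM (what is proved, stated in full; the proofs are below) =====
def Claim_equal_serve_drinks : Prop := ∀ (drinks : List String) (orders : List String), Dom_serve_drinks drinks orders → Pre_serve_drinks drinks orders → Spec_serve_drinks drinks orders (serve_drinks drinks orders)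

-- ===== LEMMAS AND PROOFS =====

-- the common value of position i: drinks indexed by the customer's earlier-occurrence count
def pvTarget (drinks orders : List String) (i : Nat) : String :=
  PySem.List.pyGetD drinks (((orders.take i).count (orders.getD i "") : Nat) : Int) ""

-- canonical recursive description of A: serve `rest` after having seen `seen`
def pvServe (drinks seen rest : List String) : List String :=
  match rest with
  | [] => []
  | c :: t => PySem.List.pyGetD drinks (seen.count c) "" :: pvServe drinks (seen ++ [c]) t

-- A's init loop gives every key counter 0
theorem pvInit_getD (orders : List String) (d : PySem.Dict String Int)
    (h : ∀ c, d.getD c 0 = 0) (c : String) :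
    (orders.foldl (fun d customer => if d.contains customer then d else d.insert customer 0) d).getD c 0 = 0 := by
  induction orders generalizing d with
  | nil => exact h c
  | cons x t ih =>
    simp only [List.foldl_cons]
    apply ih
    intro c'
    split
    · exact h c'
    · rw [PySem.Dict.getD_insert]
      split
      · rfl
      · exact h c'

-- A's serving loop computes pvServe
theorem pvLoopA (drinks : List String) (rest : List String) (d : PySem.Dict String Int)
    (acc seen : List String) (hd : ∀ c, d.getD c 0 = (seen.count c : Int)) :
    (rest.foldl
      (fun (st : PySem.Dict String Int × List String) customer =>
        let idx := st.1.getD customer 0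
        (st.1.insert customer (idx + 1), st.2 ++ [PySem.List.pyGetD drinks idx ""]))
      (d, acc)).2 = acc ++ pvServe drinks seen rest := by
  induction rest generalizing d acc seen with
  | nil => simp [pvServe]
  | cons c t ih =>
    simp only [List.foldl_cons]
    have hstep : ∀ c', (d.insert c (d.getD c 0 + 1)).getD c' 0 = (((seen ++ [c]).count c' : Nat) : Int) := by
      intro c'
      rw [PySem.Dict.getD_insert]
      by_cases hc : c' = c
      · subst hc
        rw [if_pos rfl, hd c']
        simp [List.count_append]
      · rw [if_neg hc, hd c']
        simp [List.count_append, Ne.symm hc]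
    rw [ih _ _ (seen ++ [c]) hstep, hd c]
    simp [pvServe]

theorem pvServe_length (drinks seen rest : List String) :
    (pvServe drinks seen rest).length = rest.length := by
  induction rest generalizing seen with
  | nil => rfl
  | cons c t ih => simp [pvServe, ih]

theorem pvServe_getD (drinks seen rest : List String) (i : Nat) (hi : i < rest.length) :
    (pvServe drinks seen rest).getD i "" =
      PySem.List.pyGetD drinks (((seen ++ rest.take i).count (rest.getD i "") : Nat) : Int) "" := by
  induction rest generalizing seen i with
  | nil => simp at hi
  | cons c t ih =>
    cases i with
    | zero => simp [pvServe]
    | succ j =>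
      have hj : j < t.length := by simpa using hi
      have := ih (seen ++ [c]) j hj
      simpa [pvServe, List.append_assoc] using this

-- getD after a point update
theorem pvGetD_set (l : List String) (a i : Nat) (v : String) :
    (l.set a v).getD i "" = if a = i ∧ a < l.length then v else l.getD i "" := by
  rw [List.getD_eq_getElem?_getD, List.getD_eq_getElem?_getD, List.getElem?_set]
  by_cases hai : a = i
  · subst hai
    by_cases hl : a < l.length
    · simp [hl]
    · have hnone : l[a]? = none := List.getElem?_eq_none (by omega)
      simp [hl]
  · simp [hai]

-- B's inner scatter pass preserves the length
theorem pvPass_length (drinks : List String) (c : String) (rest : List String)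
    (s : Int) (out : List String) (k : Int) :
    ((PySem.List.enumerate rest s).foldl
      (fun (st : List String × Int) p =>
        if p.2 = c then (st.1.set p.1.toNat (PySem.List.pyGetD drinks st.2 ""), st.2 + 1)
        else st)
      (out, k)).1.length = out.length := by
  induction rest generalizing s out k with
  | nil => simp [PySem.List.enumerate_nil]
  | cons x t ih =>
    rw [PySem.List.enumerate_cons, List.foldl_cons]
    by_cases hx : x = c
    · simp only [hx]
      rw [ih]
      exact List.length_set
    · simp only [if_neg hx]
      exact ih _ _ _

-- B's inner scatter pass, pointwise: position m+j with rest[j] = c receives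
-- drinks[k + (count of c among rest[0..j))]; everything else is untouched
theorem pvPass_getD (drinks : List String) (c : String) (rest : List String)
    (m : Nat) (out : List String) (k : Int) (i : Nat) :
    ((PySem.List.enumerate rest (m : Int)).foldl
      (fun (st : List String × Int) p =>
        if p.2 = c then (st.1.set p.1.toNat (PySem.List.pyGetD drinks st.2 ""), st.2 + 1)
        else st)
      (out, k)).1.getD i "" =
      if m ≤ i ∧ i - m < rest.length ∧ rest.getD (i - m) "" = c ∧ i < out.length
      then PySem.List.pyGetD drinks (k + ((rest.take (i - m)).count c : Nat)) ""
      else out.getD i "" := by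
  induction rest generalizing m out k with
  | nil =>
    simp [PySem.List.enumerate_nil]
  | cons x t ih =>
    rw [PySem.List.enumerate_cons, List.foldl_cons]
    have hcast : ((m : Int) + 1) = ((m + 1 : Nat) : Int) := by push_cast; ring
    by_cases hx : x = c
    · subst hx
      rw [if_pos (show ((m : Int), x).2 = x from rfl)]
      simp only [Int.toNat_natCast]
      rw [hcast, ih (m + 1) _ (k + 1)]
      simp only [List.length_set, List.length_cons]
      rcases Nat.lt_trichotomy i m with hlt | heq | hgt
      · rw [if_neg (by omega), if_neg (by omega), pvGetD_set, if_neg (by omega)]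
      · subst heq
        by_cases hm : i < out.length
        · rw [if_neg (by omega), pvGetD_set, if_pos ⟨rfl, hm⟩,
            if_pos ⟨Nat.le_refl i, by omega, by simp, hm⟩]
          simp
        · rw [if_neg (by omega), pvGetD_set, if_neg (by tauto),
            if_neg (by intro h; exact hm h.2.2.2)]
      · have him1 : i - m = (i - (m + 1)) + 1 := by omega
        have hgd : (x :: t).getD (i - m) "" = t.getD (i - (m + 1)) "" := by
          rw [him1]; rfl
        have htk : (x :: t).take (i - m) = x :: t.take (i - (m + 1)) := by
          rw [him1]; rfl
        rw [hgd, htk]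
        by_cases hcond : i - (m + 1) < t.length ∧ t.getD (i - (m + 1)) "" = x ∧ i < out.length
        · rw [if_pos ⟨by omega, hcond.1, hcond.2.1, hcond.2.2⟩,
            if_pos ⟨by omega, by omega, hcond.2.1, hcond.2.2⟩]
          rw [List.count_cons_self]
          push_cast
          ring_nf
        · rw [if_neg (by intro h; exact hcond ⟨by omega, h.2.2.1, h.2.2.2⟩),
            if_neg (by intro h; exact hcond ⟨by omega, h.2.2.1, h.2.2.2⟩),
            pvGetD_set, if_neg (by omega)]
    · rw [if_neg (show ¬ (((m : Int), x).2 = c) from hx)]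
      rw [hcast, ih (m + 1) _ k]
      simp only [List.length_cons]
      rcases Nat.lt_trichotomy i m with hlt | heq | hgt
      · rw [if_neg (by omega), if_neg (by omega)]
      · subst heq
        have hne : ¬(i ≤ i ∧ i - i < t.length + 1 ∧ (x :: t).getD (i - i) "" = c ∧ i < out.length) := by
          intro h
          have h0 : i - i = 0 := by omega
          rw [h0] at h
          exact hx (by simpa using h.2.2.1)
        rw [if_neg (by omega), if_neg hne]
      · have him1 : i - m = (i - (m + 1)) + 1 := by omega
        have hgd : (x :: t).getD (i - m) "" = t.getD (i - (m + 1)) "" := by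
          rw [him1]; rfl
        have htk : (x :: t).take (i - m) = x :: t.take (i - (m + 1)) := by
          rw [him1]; rfl
        rw [hgd, htk]
        by_cases hcond : i - (m + 1) < t.length ∧ t.getD (i - (m + 1)) "" = c ∧ i < out.length
        · rw [if_pos ⟨by omega, hcond.1, hcond.2.1, hcond.2.2⟩,
            if_pos ⟨by omega, by omega, hcond.2.1, hcond.2.2⟩]
          rw [List.count_cons_of_ne (show x ≠ c from hx)]
        · rw [if_neg (by intro h; exact hcond ⟨by omega, h.2.2.1, h.2.2.2⟩),
            if_neg (by intro h; exact hcond ⟨by omega, h.2.2.1, h.2.2.2⟩)]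

-- specialization m = 0, k = 0: one full pass writes pvTarget at this customer's positions
theorem pvPass_full (drinks orders : List String) (c : String) (out : List String) (i : Nat) :
    ((PySem.List.enumerate orders).foldl
      (fun (st : List String × Int) p =>
        if p.2 = c then (st.1.set p.1.toNat (PySem.List.pyGetD drinks st.2 ""), st.2 + 1)
        else st)
      (out, 0)).1.getD i "" =
      if i < orders.length ∧ orders.getD i "" = c ∧ i < out.length
      then pvTarget drinks orders i
      else out.getD i "" := by
  have h := pvPass_getD drinks c orders 0 out 0 i
  simp only [Nat.cast_zero, Nat.sub_zero, zero_add] at h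
  rw [h]
  by_cases hc : i < orders.length ∧ orders.getD i "" = c ∧ i < out.length
  · rw [if_pos ⟨Nat.zero_le i, hc.1, hc.2.1, hc.2.2⟩, if_pos hc]
    simp only [pvTarget, hc.2.1]
  · rw [if_neg (fun h' => hc ⟨h'.2.1, h'.2.2.1, h'.2.2.2⟩), if_neg hc]

-- the outer loop over (distinct) customers
theorem pvOuter_length (drinks orders : List String) (cs : List String) (out : List String) :
    (cs.foldl
      (fun out c =>
        ((PySem.List.enumerate orders).foldl
          (fun (st : List String × Int) p =>
            if p.2 = c then (st.1.set p.1.toNat (PySem.List.pyGetD drinks st.2 ""), st.2 + 1)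
            else st)
          (out, 0)).1)
      out).length = out.length := by
  induction cs generalizing out with
  | nil => rfl
  | cons c cs ih => rw [List.foldl_cons, ih, pvPass_length]

theorem pvOuter_getD (drinks orders : List String) (cs : List String) (out : List String)
    (hlen : out.length = orders.length) (i : Nat) (hi : i < orders.length) :
    (cs.foldl
      (fun out c =>
        ((PySem.List.enumerate orders).foldl
          (fun (st : List String × Int) p =>
            if p.2 = c then (st.1.set p.1.toNat (PySem.List.pyGetD drinks st.2 ""), st.2 + 1)
            else st)
          (out, 0)).1)
      out).getD i "" =
      if orders.getD i "" ∈ cs then pvTarget drinks orders i else out.getD i "" := by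
  induction cs generalizing out with
  | nil => simp
  | cons c cs ih =>
    rw [List.foldl_cons, ih _ (by rw [pvPass_length]; exact hlen), pvPass_full]
    simp only [List.mem_cons]
    have hout : i < out.length := by omega
    by_cases hmem : orders.getD i "" ∈ cs
    · rw [if_pos hmem, if_pos (Or.inr hmem)]
    · rw [if_neg hmem]
      by_cases hc : orders.getD i "" = c
      · rw [if_pos ⟨hi, hc, hout⟩, if_pos (Or.inl hc)]
      · rw [if_neg (by tauto), if_neg (by tauto)]

-- ===== VERDICT (by name: the statement is the Claim_ definition above) =====
theorem serve_drinks_spec : Claim_equal_serve_drinks := by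
  intro drinks orders _ _
  unfold Spec_serve_drinks
  -- A's result is pvServe drinks [] orders
  have hA : serve_drinks drinks orders = pvServe drinks [] orders := by
    unfold serve_drinks
    rw [pvLoopA drinks orders _ [] []
        (fun c => by simpa using pvInit_getD orders PySem.Dict.empty (fun c => PySem.Dict.getD_empty c 0) c)]
    simp
  have hAlen : (serve_drinks drinks orders).length = orders.length := by
    rw [hA, pvServe_length]
  have hBlen : (serve_drinks_alt drinks orders).length = orders.length := by
    unfold serve_drinks_alt
    rw [pvOuter_length]
    simp
  apply List.ext_getElem (by rw [hAlen, hBlen])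
  intro i h1 h2
  have hi : i < orders.length := by rw [hAlen] at h1; exact h1
  rw [← List.getD_eq_getElem _ "" h1, ← List.getD_eq_getElem _ "" h2]
  have hAi : (serve_drinks drinks orders).getD i "" = pvTarget drinks orders i := by
    rw [hA, pvServe_getD drinks [] orders i hi]
    simp [pvTarget]
  have hBi : (serve_drinks_alt drinks orders).getD i "" = pvTarget drinks orders i := by
    have hmem : orders.getD i "" ∈ PySem.List.dedup orders := by
      rw [PySem.List.mem_dedup, List.getD_eq_getElem _ "" hi]
      exact List.getElem_mem hi
    unfold serve_drinks_alt
    rw [pvOuter_getD drinks orders _ _ (by simp) i hi, if_pos hmem]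
  rw [hAi, hBi]
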